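-- pv_equiv track=rewrite | github.com/alexander-beedie/polars | py-polars/docs/source/_ext/railroad_diagrams.py | _parse_ebnf
-- ===== SOURCE A (Python) =====
-- from typing import TYPE_CHECKING, Any, ClassVar
--
-- def _parse_ebnf(content: str) -> dict[str, Any]:
--     """Parse EBNF-like notation into a dict of rules."""
--     rules = {}
--     current_rule = None
--     current_rhs = []
--
--     for line in content.split("\n"):
--         line = line.strip()
--         if not line:
--             continue
--
--         # Check if this is a rule definition (contains ::=)
--         if "::=" in line:
--             # Save previous rule if any
--             if current_rule:
--                 rules[current_rule] = " ".join(current_rhs)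
--
--             # Start new rule
--             lhs, rhs = line.split("::=", 1)
--             current_rule = lhs.strip()
--             current_rhs = [rhs.strip()]
--         elif current_rule and (line.startswith("|") or not line.startswith("::")):
--             # Continuation of current rule
--             current_rhs.append(line)
--
--     # Save last rule
--     if current_rule:
--         rules[current_rule] = " ".join(current_rhs)
--
--     return rules
-- ===== SOURCE B (Python) =====
-- def _parse_ebnf(content: str) -> dict:
--     """Parse EBNF-like notation into a dict of rules (partition-then-map)."""
--     lines = [s for s in (ln.strip() for ln in content.split("\n")) if s]
--     n = len(lines)
--     rules = {}
--     # skip any lines before the first rule header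
--     i = 0
--     while i < n and "::=" not in lines[i]:
--         i += 1
--     # each iteration consumes one block: a header line plus its non-header body
--     while i < n:
--         j = i + 1
--         while j < n and "::=" not in lines[j]:
--             j += 1
--         lhs, rhs = lines[i].split("::=", 1)
--         key = lhs.strip()
--         if key:
--             parts = [rhs.strip()] + [
--                 ln for ln in lines[i + 1 : j]
--                 if ln.startswith("|") or not ln.startswith("::")
--             ]
--             rules[key] = " ".join(parts)
--         i = j
--     return rules
-- ===== Notes on version B (the rewrite author's own statement) =====
-- stated objective: alternative
-- what changed: Replaces A's running current_rule/current_rhs accumulator with end-of-input flush by a partition-then-map pipeline: strip and drop empty lines first, partition the sequence into blocks starting at '::=' header lines, and map each block to one dict entry.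
import Mathlib
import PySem

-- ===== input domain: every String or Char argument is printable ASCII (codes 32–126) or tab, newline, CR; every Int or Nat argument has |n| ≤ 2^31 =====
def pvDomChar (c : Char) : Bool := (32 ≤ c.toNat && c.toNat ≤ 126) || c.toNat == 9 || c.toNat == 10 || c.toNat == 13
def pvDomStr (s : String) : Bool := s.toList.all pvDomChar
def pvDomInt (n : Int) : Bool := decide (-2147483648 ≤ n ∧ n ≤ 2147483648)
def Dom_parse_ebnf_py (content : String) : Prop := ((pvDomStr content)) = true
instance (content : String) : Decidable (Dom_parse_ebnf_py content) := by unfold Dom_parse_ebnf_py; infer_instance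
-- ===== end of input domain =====

-- B replaces A's running-accumulator/flush loop with a partition-into-blocks-then-map pipeline (objective: alternative, same cost).

-- ===== PORT A =====
-- shared tiny predicates, identical text in both Python sources:
-- '"::=" in line'
def pvIsHeader (line : String) : Bool := PySem.Str.isIn "::=" line
-- 'line.startswith("|") or not line.startswith("::")'
def pvCont (line : String) : Bool := PySem.Str.startswith line "|" || !PySem.Str.startswith line "::"
-- 'line.split("::=", 1)' → (lhs, rhs); when "::=" is in line the split has exactly 2 parts,
-- so headD/tail-headD defaults are never used there.
def pvSplitHeader (line : String) : String × String :=
  let parts := (PySem.Str.splitMax? line "::=" 1).getD []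
  (parts.headD "", parts.tail.headD "")

-- A's loop body: state = (rules, current_rule, current_rhs); current_rule = "" plays Python's
-- falsy None/"" role (A only ever truth-tests it or uses it as a key when truthy, so this is exact).
def pvStepA (st : PySem.Dict String String × String × List String) (rawline : String) :
    PySem.Dict String String × String × List String :=
  let line := PySem.Str.strip rawline
  if line = "" then st
  else if pvIsHeader line then
    let d' := if st.2.1 ≠ "" then st.1.insert st.2.1 (PySem.Str.join " " st.2.2) else st.1
    let lr := pvSplitHeader line
    (d', PySem.Str.strip lr.1, [PySem.Str.strip lr.2])
  else if st.2.1 ≠ "" && pvCont line then (st.1, st.2.1, st.2.2 ++ [line])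
  else st

def parse_ebnf_py (content : String) : List (String × String) :=
  let fin : PySem.Dict String String × String × List String :=
    ((PySem.Str.split? content "\n").getD []).foldl pvStepA (PySem.Dict.empty, "", [])
  (if fin.2.1 ≠ "" then fin.1.insert fin.2.1 (PySem.Str.join " " fin.2.2) else fin.1).items

-- ===== PORT B =====
-- the inner while of Source B: body = non-header run, then the rest; the outer while advances block by block.
def pvLoopB (head : String) (rest : List String) (d : PySem.Dict String String) :
    PySem.Dict String String :=
  let body := rest.takeWhile (fun l => !pvIsHeader l)
  let lr := pvSplitHeader head
  let key := PySem.Str.strip lr.1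
  let d' :=
    if key ≠ "" then
      d.insert key (PySem.Str.join " " (PySem.Str.strip lr.2 :: body.filter pvCont))
    else d
  match _hres : rest.dropWhile (fun l => !pvIsHeader l) with
  | [] => d'
  | h :: t => pvLoopB h t d'
termination_by rest.length
decreasing_by
  have h1 : (rest.dropWhile (fun l => !pvIsHeader l)).length ≤ rest.length :=
    List.length_dropWhile_le _ _
  rw [_hres] at h1
  simp at h1
  omega

def parse_ebnf_py_alt (content : String) : List (String × String) :=
  let lines := (((PySem.Str.split? content "\n").getD []).map PySem.Str.strip).filter (· ≠ "")
  match lines.dropWhile (fun l => !pvIsHeader l) with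
  | [] => ([] : List (String × String))
  | h :: t => (pvLoopB h t PySem.Dict.empty).items

-- ===== PRECONDITION & SPEC =====
def Spec_parse_ebnf_py (content : String) (out : List (String × String)) : Prop := out = parse_ebnf_py_alt content
instance (content : String) (out : List (String × String)) : Decidable (Spec_parse_ebnf_py content out) := by unfold Spec_parse_ebnf_py; infer_instance

-- ===== CLAIM (what is proved, stated in full; the proofs are below) =====
def Claim_equal_parse_ebnf_py : Prop := ∀ (content : String), Dom_parse_ebnf_py content → Spec_parse_ebnf_py content (parse_ebnf_py content)

-- ===== LEMMAS AND PROOFS =====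

-- A's step on an already-stripped, nonempty line
def pvStepC (st : PySem.Dict String String × String × List String) (line : String) :
    PySem.Dict String String × String × List String :=
  if pvIsHeader line then
    let d' := if st.2.1 ≠ "" then st.1.insert st.2.1 (PySem.Str.join " " st.2.2) else st.1
    let lr := pvSplitHeader line
    (d', PySem.Str.strip lr.1, [PySem.Str.strip lr.2])
  else if st.2.1 ≠ "" && pvCont line then (st.1, st.2.1, st.2.2 ++ [line])
  else st

def pvFlush (st : PySem.Dict String String × String × List String) :
    PySem.Dict String String :=
  if st.2.1 ≠ "" then st.1.insert st.2.1 (PySem.Str.join " " st.2.2) else st.1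

def pvClean (ls : List String) : List String :=
  (ls.map PySem.Str.strip).filter (· ≠ "")

theorem pvStepA_eq (st : PySem.Dict String String × String × List String) (l : String) :
    pvStepA st l = if PySem.Str.strip l = "" then st else pvStepC st (PySem.Str.strip l) := rfl

theorem foldA_eq_foldC (ls : List String) (st : PySem.Dict String String × String × List String) :
    ls.foldl pvStepA st = (pvClean ls).foldl pvStepC st := by
  induction ls generalizing st with
  | nil => rfl
  | cons l ls ih =>
      simp only [List.foldl_cons, pvClean, List.map_cons, List.filter_cons, pvStepA_eq]
      by_cases h : PySem.Str.strip l = ""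
      · simp [h, ih, pvClean]
      · simp [h, ih, pvClean]

theorem fold_nonheader_empty (ls : List String) (d : PySem.Dict String String)
    (rhs : List String) (hnh : ∀ l ∈ ls, pvIsHeader l = false) :
    ls.foldl pvStepC (d, "", rhs) = (d, "", rhs) := by
  induction ls with
  | nil => rfl
  | cons l ls ih =>
      have h0 : pvIsHeader l = false := hnh l (by simp)
      have hstep : pvStepC (d, "", rhs) l = (d, "", rhs) := by
        simp [pvStepC, h0]
      simp only [List.foldl_cons, hstep]
      exact ih (fun x hx => hnh x (by simp [hx]))

theorem fold_nonheader_cur (ls : List String) (d : PySem.Dict String String)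
    (cur : String) (rhs : List String) (hcur : cur ≠ "")
    (hnh : ∀ l ∈ ls, pvIsHeader l = false) :
    ls.foldl pvStepC (d, cur, rhs) = (d, cur, rhs ++ ls.filter pvCont) := by
  induction ls generalizing rhs with
  | nil => simp
  | cons l ls ih =>
      have h0 : pvIsHeader l = false := hnh l (by simp)
      have hrec := fun rhs' => ih rhs' (fun x hx => hnh x (by simp [hx]))
      by_cases hc : pvCont l = true
      · have hstep : pvStepC (d, cur, rhs) l = (d, cur, rhs ++ [l]) := by
          simp [pvStepC, h0, hcur, hc]
        simp only [List.foldl_cons, hstep, hrec, List.filter_cons, hc]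
        simp
      · have hstep : pvStepC (d, cur, rhs) l = (d, cur, rhs) := by
          simp [pvStepC, h0, hc]
        simp only [List.foldl_cons, hstep, hrec, List.filter_cons]
        simp [hc]

theorem pvStepC_header (st : PySem.Dict String String × String × List String) (h : String)
    (hh : pvIsHeader h = true) :
    pvStepC st h = (pvFlush st, PySem.Str.strip (pvSplitHeader h).1,
      [PySem.Str.strip (pvSplitHeader h).2]) := by
  simp [pvStepC, pvFlush, hh]

theorem pvHeadDrop (p : String → Bool) (l : List String) (x : String) (xs : List String)
    (h : l.dropWhile p = x :: xs) : p x = false := by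
  have hne : l.dropWhile p ≠ [] := by simp [h]
  have h2 := List.head_dropWhile_not p hne
  have hx : (l.dropWhile p).head hne = x := by simp [h]
  rwa [hx] at h2

theorem block_main (n : Nat) : ∀ (t : List String), t.length ≤ n →
    ∀ (h0 : String) (st : PySem.Dict String String × String × List String),
    pvIsHeader h0 = true →
    pvFlush ((h0 :: t).foldl pvStepC st) = pvLoopB h0 t (pvFlush st) := by
  induction n with
  | zero =>
      intro t ht h0 st hh
      have ht0 : t = [] := List.eq_nil_of_length_eq_zero (Nat.le_zero.mp ht)
      subst ht0
      simp only [List.foldl_cons, List.foldl_nil, pvStepC_header _ _ hh]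
      rw [pvLoopB]
      by_cases hk : PySem.Str.strip (pvSplitHeader h0).1 = "" <;>
        simp [pvFlush, hk]
  | succ n ih =>
      intro t ht h0 st hh
      simp only [List.foldl_cons, pvStepC_header _ _ hh]
      have hsplit : t.takeWhile (fun l => !pvIsHeader l) ++ t.dropWhile (fun l => !pvIsHeader l)
          = t := List.takeWhile_append_dropWhile
      have hbody : ∀ l ∈ t.takeWhile (fun l => !pvIsHeader l), pvIsHeader l = false := by
        intro l hl
        simpa using List.mem_takeWhile_imp hl
      rw [pvLoopB]
      by_cases hk : PySem.Str.strip (pvSplitHeader h0).1 = ""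
      · -- empty lhs: the whole block is dropped
        have hfold : (t.takeWhile (fun l => !pvIsHeader l)).foldl pvStepC
            (pvFlush st, PySem.Str.strip (pvSplitHeader h0).1,
              [PySem.Str.strip (pvSplitHeader h0).2])
            = (pvFlush st, PySem.Str.strip (pvSplitHeader h0).1,
              [PySem.Str.strip (pvSplitHeader h0).2]) := by
          rw [hk]; exact fold_nonheader_empty _ _ _ hbody
        cases hrest : t.dropWhile (fun l => !pvIsHeader l) with
        | nil =>
            conv_lhs => rw [← hsplit]
            rw [List.foldl_append, hfold, hrest]
            simp [pvFlush, hk]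
        | cons h1 t1 =>
            have hh1 : pvIsHeader h1 = true := by
              simpa using pvHeadDrop _ _ _ _ hrest
            have ht1 : t1.length ≤ n := by
              have h1le := List.length_dropWhile_le (fun l => !pvIsHeader l) t
              rw [hrest] at h1le
              simp at h1le
              omega
            conv_lhs => rw [← hsplit]
            rw [List.foldl_append, hfold, hrest, ih t1 ht1 h1 _ hh1]
            have h2 : pvFlush (pvFlush st, PySem.Str.strip (pvSplitHeader h0).1,
                [PySem.Str.strip (pvSplitHeader h0).2]) = pvFlush st := by
              simp [pvFlush, hk]
            rw [h2]
            simp [hk]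
      · -- nonempty lhs: continuation lines of the body accumulate
        have hfold := fold_nonheader_cur (t.takeWhile (fun l => !pvIsHeader l)) (pvFlush st)
          (PySem.Str.strip (pvSplitHeader h0).1) [PySem.Str.strip (pvSplitHeader h0).2]
          hk hbody
        simp only [List.singleton_append] at hfold
        cases hrest : t.dropWhile (fun l => !pvIsHeader l) with
        | nil =>
            conv_lhs => rw [← hsplit]
            rw [List.foldl_append, hfold, hrest]
            simp [pvFlush, hk]
        | cons h1 t1 =>
            have hh1 : pvIsHeader h1 = true := by
              simpa using pvHeadDrop _ _ _ _ hrest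
            have ht1 : t1.length ≤ n := by
              have h1le := List.length_dropWhile_le (fun l => !pvIsHeader l) t
              rw [hrest] at h1le
              simp at h1le
              omega
            conv_lhs => rw [← hsplit]
            rw [List.foldl_append, hfold, hrest, ih t1 ht1 h1 _ hh1]
            have h2 : pvFlush (pvFlush st, PySem.Str.strip (pvSplitHeader h0).1,
                PySem.Str.strip (pvSplitHeader h0).2 ::
                  (t.takeWhile (fun l => !pvIsHeader l)).filter pvCont)
                = (pvFlush st).insert (PySem.Str.strip (pvSplitHeader h0).1)
                    (PySem.Str.join " " (PySem.Str.strip (pvSplitHeader h0).2 ::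
                      (t.takeWhile (fun l => !pvIsHeader l)).filter pvCont)) := by
              simp [pvFlush, hk]
            rw [h2]
            simp [hk]

theorem parse_ebnf_py_alt_eq (content : String) :
    parse_ebnf_py_alt content =
      (match (pvClean ((PySem.Str.split? content "\n").getD [])).dropWhile
          (fun l => !pvIsHeader l) with
        | [] => ([] : List (String × String))
        | h :: t => (pvLoopB h t PySem.Dict.empty).items) := rfl

-- ===== VERDICT (by name: the statement is the Claim_ definition above) =====
theorem parse_ebnf_py_spec : Claim_equal_parse_ebnf_py := by
  unfold Claim_equal_parse_ebnf_py
  intro content _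
  unfold Spec_parse_ebnf_py
  have hA : parse_ebnf_py content
      = (pvFlush ((pvClean ((PySem.Str.split? content "\n").getD [])).foldl pvStepC
          (PySem.Dict.empty, "", []))).items := by
    rw [parse_ebnf_py, ← foldA_eq_foldC]
    rfl
  rw [hA, parse_ebnf_py_alt_eq]
  have hsplit : (pvClean ((PySem.Str.split? content "\n").getD [])).takeWhile
        (fun l => !pvIsHeader l)
      ++ (pvClean ((PySem.Str.split? content "\n").getD [])).dropWhile
        (fun l => !pvIsHeader l)
      = pvClean ((PySem.Str.split? content "\n").getD []) :=
    List.takeWhile_append_dropWhile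
  have hpre : ∀ l ∈ (pvClean ((PySem.Str.split? content "\n").getD [])).takeWhile
      (fun l => !pvIsHeader l), pvIsHeader l = false := by
    intro l hl
    simpa using List.mem_takeWhile_imp hl
  cases hrest : (pvClean ((PySem.Str.split? content "\n").getD [])).dropWhile
      (fun l => !pvIsHeader l) with
  | nil =>
      conv_lhs => rw [← hsplit]
      rw [List.foldl_append, fold_nonheader_empty _ _ _ hpre, hrest]
      simp [pvFlush]
      rfl
  | cons h1 t1 =>
      have hh1 : pvIsHeader h1 = true := by
        simpa using pvHeadDrop _ _ _ _ hrest
      conv_lhs => rw [← hsplit]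
      rw [List.foldl_append, fold_nonheader_empty _ _ _ hpre, hrest,
        block_main t1.length t1 (le_refl _) h1 _ hh1]
      have h2 : pvFlush (PySem.Dict.empty, "", ([] : List String)) = PySem.Dict.empty := by
        simp [pvFlush]
      rw [h2]
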